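-- pv_equiv track=rewrite | github.com/mahingaRodin/epiguard-micorservice-ai | app/model/inference.py | _cluster_disease
-- ===== SOURCE A (Python) =====
-- def _cluster_disease(symptoms: list) -> str:
--     types = {s.get("symptom_type", s.get("type", "")).lower() for s in symptoms}
--     if {"fever", "cough", "shortness_of_breath"} & types:
--         return "Respiratory Infection"
--     if {"fever", "rash", "joint_pain"} & types:
--         return "Suspected Arboviral Disease"
--     if {"diarrhea", "vomiting"} & types:
--         return "Gastrointestinal Illness"
--     if {"fever", "headache", "fatigue"} & types:
--         return "Febrile Illness"
--     if len(types) >= 4: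
--         return "Multi-symptom Syndrome"
--     return "Undetermined"
-- ===== SOURCE B (Python) =====
-- _PRIO = {"fever": 0, "cough": 0, "shortness_of_breath": 0,
--          "rash": 1, "joint_pain": 1,
--          "diarrhea": 2, "vomiting": 2,
--          "headache": 3, "fatigue": 3}
-- _LABELS = ["Respiratory Infection", "Suspected Arboviral Disease",
--            "Gastrointestinal Illness", "Febrile Illness"]
--
-- def _cluster_disease(symptoms: list) -> str:
--     types = {s.get("symptom_type", s.get("type", "")).lower() for s in symptoms}
--     best = None
--     for t in types:
--         p = _PRIO.get(t)
--         if p is not None and (best is None or p < best):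
--             best = p
--     if best is not None:
--         return _LABELS[best]
--     return "Multi-symptom Syndrome" if len(types) >= 4 else "Undetermined"
-- ===== Notes on version B (the rewrite author's own statement) =====
-- stated objective: alternative
-- what changed: Replaces A's cascade of four set-intersection tests against hard-coded category sets by a static inverted index mapping each recognized symptom keyword to its category priority and a single min-tracking pass over the symptom types, indexing into a label table.
import Mathlib
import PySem

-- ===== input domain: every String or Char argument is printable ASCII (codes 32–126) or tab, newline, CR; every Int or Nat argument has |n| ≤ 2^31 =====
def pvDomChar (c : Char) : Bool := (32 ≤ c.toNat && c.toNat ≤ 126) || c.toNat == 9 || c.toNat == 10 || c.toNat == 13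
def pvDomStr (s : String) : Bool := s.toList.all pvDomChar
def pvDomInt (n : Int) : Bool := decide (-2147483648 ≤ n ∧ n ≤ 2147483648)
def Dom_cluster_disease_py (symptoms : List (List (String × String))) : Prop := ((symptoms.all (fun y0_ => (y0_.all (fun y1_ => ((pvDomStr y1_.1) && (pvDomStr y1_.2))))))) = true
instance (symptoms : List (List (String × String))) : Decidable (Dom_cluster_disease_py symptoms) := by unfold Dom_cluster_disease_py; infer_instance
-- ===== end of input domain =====

-- B replaces A's four-set-intersection cascade by a static keyword→priority inverted index and a
-- single min-tracking pass over the symptom types (objective: alternative decomposition, same cost).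

-- `s.get("symptom_type", s.get("type", "")).lower()`, shared verbatim by both Pythons
def pvTypeOf (s : List (String × String)) : String :=
  PySem.Str.lower (PySem.Dict.getD (PySem.Dict.mk s) "symptom_type" (PySem.Dict.getD (PySem.Dict.mk s) "type" ""))

-- ===== PORT A =====
def cluster_disease_py (symptoms : List (List (String × String))) : String :=
  let types : PySem.Set String := PySem.Set.ofList (symptoms.map pvTypeOf)
  if PySem.Set.inter ["fever", "cough", "shortness_of_breath"] types ≠ [] then "Respiratory Infection"
  else if PySem.Set.inter ["fever", "rash", "joint_pain"] types ≠ [] then "Suspected Arboviral Disease"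
  else if PySem.Set.inter ["diarrhea", "vomiting"] types ≠ [] then "Gastrointestinal Illness"
  else if PySem.Set.inter ["fever", "headache", "fatigue"] types ≠ [] then "Febrile Illness"
  else if 4 ≤ types.length then "Multi-symptom Syndrome"
  else "Undetermined"

-- ===== PORT B =====
def pvPrioDict : PySem.Dict String Nat :=
  PySem.Dict.mk [("fever", 0), ("cough", 0), ("shortness_of_breath", 0),
                 ("rash", 1), ("joint_pain", 1),
                 ("diarrhea", 2), ("vomiting", 2),
                 ("headache", 3), ("fatigue", 3)]

def pvLabels : List String :=
  ["Respiratory Infection", "Suspected Arboviral Disease",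
   "Gastrointestinal Illness", "Febrile Illness"]

-- loop body: p = _PRIO.get(t); if p is not None and (best is None or p < best): best = p
def pvStep (best : Option Nat) (t : String) : Option Nat :=
  match PySem.Dict.get? pvPrioDict t with
  | none => best
  | some p =>
    match best with
    | none => some p
    | some b => if p < b then some p else best

def cluster_disease_py_alt (symptoms : List (List (String × String))) : String :=
  let types : PySem.Set String := PySem.Set.ofList (symptoms.map pvTypeOf)
  -- iterating the set: the min tracked is independent of the iteration order
  match types.foldl pvStep none with
  | some best => pvLabels.getD best ""   -- _LABELS[best]; best < 4 always, so getD is exact here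
  | none => if 4 ≤ types.length then "Multi-symptom Syndrome" else "Undetermined"

-- ===== PRECONDITION & SPEC =====
def Spec_cluster_disease_py (symptoms : List (List (String × String))) (out : String) : Prop := out = cluster_disease_py_alt symptoms
instance (symptoms : List (List (String × String))) (out : String) : Decidable (Spec_cluster_disease_py symptoms out) := by unfold Spec_cluster_disease_py; infer_instance

-- ===== CLAIM (what is proved, stated in full; the proofs are below) =====
def Claim_equal_cluster_disease_py : Prop := ∀ (symptoms : List (List (String × String))), Dom_cluster_disease_py symptoms → Spec_cluster_disease_py symptoms (cluster_disease_py symptoms)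

-- ===== LEMMAS AND PROOFS =====

-- min on Option Nat (none = "no keyword seen yet")
def pvOptM (a b : Option Nat) : Option Nat :=
  match a, b with
  | none, b => b
  | a, none => a
  | some x, some y => some (min x y)

lemma pvStep_eq (b : Option Nat) (t : String) :
    pvStep b t = pvOptM b (PySem.Dict.get? pvPrioDict t) := by
  unfold pvStep pvOptM
  cases h : PySem.Dict.get? pvPrioDict t with
  | none => cases b <;> rfl
  | some p =>
    cases b with
    | none => rfl
    | some q =>
      by_cases hpq : p < q <;> simp [hpq] <;> omega

lemma pvOptM_assoc (a b c : Option Nat) :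
    pvOptM (pvOptM a b) c = pvOptM a (pvOptM b c) := by
  cases a <;> cases b <;> cases c <;> simp [pvOptM, Nat.min_assoc]

-- smin: the order-independent value of B's loop
def pvSmin (ts : List String) : Option Nat :=
  ts.foldr (fun t r => pvOptM (PySem.Dict.get? pvPrioDict t) r) none

lemma pv_foldl_smin (ts : List String) : ∀ acc : Option Nat,
    ts.foldl pvStep acc = pvOptM acc (pvSmin ts) := by
  induction ts with
  | nil => intro acc; cases acc <;> rfl
  | cons t ts ih =>
    intro acc
    simp only [List.foldl_cons, ih, pvStep_eq, pvSmin, List.foldr_cons, pvOptM_assoc]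

-- the four membership conditions of A's cascade
def pvC0 (ts : List String) : Bool := ts.contains "fever" || ts.contains "cough" || ts.contains "shortness_of_breath"
def pvC1 (ts : List String) : Bool := ts.contains "fever" || ts.contains "rash" || ts.contains "joint_pain"
def pvC2 (ts : List String) : Bool := ts.contains "diarrhea" || ts.contains "vomiting"
def pvC3 (ts : List String) : Bool := ts.contains "fever" || ts.contains "headache" || ts.contains "fatigue"

def pvChain (ts : List String) : Option Nat :=
  if pvC0 ts then some 0 else if pvC1 ts then some 1
  else if pvC2 ts then some 2 else if pvC3 ts then some 3 else none

lemma pvSmin_eq_chain (ts : List String) : pvSmin ts = pvChain ts := by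
  induction ts with
  | nil => rfl
  | cons t ts ih =>
    have hrec : pvSmin (t :: ts) = pvOptM (PySem.Dict.get? pvPrioDict t) (pvSmin ts) := rfl
    rw [hrec, ih]
    by_cases h1 : t = "fever"
    · subst h1; unfold pvChain pvC0 pvC1 pvC2 pvC3
      simp only [List.contains_cons]; norm_num
      split_ifs <;> simp_all [pvPrioDict, PySem.Dict.get?, pvOptM]
    · 
      by_cases h2 : t = "cough"
      · subst h2; unfold pvChain pvC0 pvC1 pvC2 pvC3
        simp only [List.contains_cons]; norm_num
        split_ifs <;> simp_all [pvPrioDict, PySem.Dict.get?, pvOptM]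
      · 
        by_cases h3 : t = "shortness_of_breath"
        · subst h3; unfold pvChain pvC0 pvC1 pvC2 pvC3
          simp only [List.contains_cons]; norm_num
          split_ifs <;> simp_all [pvPrioDict, PySem.Dict.get?, pvOptM]
        · 
          by_cases h4 : t = "rash"
          · subst h4; unfold pvChain pvC0 pvC1 pvC2 pvC3
            simp only [List.contains_cons]; norm_num
            split_ifs <;> simp_all [pvPrioDict, PySem.Dict.get?, pvOptM]
          · 
            by_cases h5 : t = "joint_pain"
            · subst h5; unfold pvChain pvC0 pvC1 pvC2 pvC3
              simp only [List.contains_cons]; norm_num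
              split_ifs <;> simp_all [pvPrioDict, PySem.Dict.get?, pvOptM]
            · 
              by_cases h6 : t = "diarrhea"
              · subst h6; unfold pvChain pvC0 pvC1 pvC2 pvC3
                simp only [List.contains_cons]; norm_num
                split_ifs <;> simp_all [pvPrioDict, PySem.Dict.get?, pvOptM]
              · 
                by_cases h7 : t = "vomiting"
                · subst h7; unfold pvChain pvC0 pvC1 pvC2 pvC3
                  simp only [List.contains_cons]; norm_num
                  split_ifs <;> simp_all [pvPrioDict, PySem.Dict.get?, pvOptM]
                · 
                  by_cases h8 : t = "headache"
                  · subst h8; unfold pvChain pvC0 pvC1 pvC2 pvC3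
                    simp only [List.contains_cons]; norm_num
                    split_ifs <;> simp_all [pvPrioDict, PySem.Dict.get?, pvOptM]
                  · 
                    by_cases h9 : t = "fatigue"
                    · subst h9; unfold pvChain pvC0 pvC1 pvC2 pvC3
                      simp only [List.contains_cons]; norm_num
                      split_ifs <;> simp_all [pvPrioDict, PySem.Dict.get?, pvOptM]
                    ·
                      have hp : PySem.Dict.get? pvPrioDict t = none := by
                        simp [pvPrioDict, PySem.Dict.get?, beq_iff_eq, Ne.symm h1, Ne.symm h2, Ne.symm h3, Ne.symm h4, Ne.symm h5, Ne.symm h6, Ne.symm h7, Ne.symm h8, Ne.symm h9]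
                      unfold pvChain pvC0 pvC1 pvC2 pvC3
                      simp [hp, pvOptM, Ne.symm h1, Ne.symm h2, Ne.symm h3, Ne.symm h4, Ne.symm h5, Ne.symm h6, Ne.symm h7, Ne.symm h8, Ne.symm h9]

-- A's set-intersection truthiness ⇔ the disjunction of memberships
lemma pv_inter_ne_nil (ks ts : List String) :
    (PySem.Set.inter ks ts ≠ []) ↔ ∃ k ∈ ks, k ∈ ts := by
  constructor
  · intro h
    obtain ⟨x, hx⟩ := List.exists_mem_of_ne_nil _ h
    have hm := (PySem.Set.mem_inter _ _ _).mp hx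
    exact ⟨x, hm.1, hm.2⟩
  · rintro ⟨k, hk, hkt⟩ hnil
    have hm : k ∈ PySem.Set.inter ks ts := (PySem.Set.mem_inter _ _ _).mpr ⟨hk, hkt⟩
    rw [hnil] at hm
    exact absurd hm (List.not_mem_nil)

lemma pv_cond0 (ts : List String) :
    (PySem.Set.inter ["fever", "cough", "shortness_of_breath"] ts ≠ []) ↔ pvC0 ts = true := by
  rw [pv_inter_ne_nil]; simp [pvC0, or_assoc]

lemma pv_cond1 (ts : List String) :
    (PySem.Set.inter ["fever", "rash", "joint_pain"] ts ≠ []) ↔ pvC1 ts = true := by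
  rw [pv_inter_ne_nil]; simp [pvC1, or_assoc]

lemma pv_cond2 (ts : List String) :
    (PySem.Set.inter ["diarrhea", "vomiting"] ts ≠ []) ↔ pvC2 ts = true := by
  rw [pv_inter_ne_nil]; simp [pvC2]

lemma pv_cond3 (ts : List String) :
    (PySem.Set.inter ["fever", "headache", "fatigue"] ts ≠ []) ↔ pvC3 ts = true := by
  rw [pv_inter_ne_nil]; simp [pvC3, or_assoc]

-- ===== VERDICT (by name: the statement is the Claim_ definition above) =====
theorem cluster_disease_py_spec : Claim_equal_cluster_disease_py := by
  intro symptoms _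
  unfold Spec_cluster_disease_py cluster_disease_py cluster_disease_py_alt
  set ts := PySem.Set.ofList (symptoms.map pvTypeOf) with hts
  simp only [pv_foldl_smin, pvSmin_eq_chain]
  by_cases c0 : pvC0 ts = true
  · simp [pvChain, c0, pv_cond0, pvOptM, pvLabels]
  · by_cases c1 : pvC1 ts = true
    · simp [pvChain, c0, c1, pv_cond0, pv_cond1, pvOptM, pvLabels]
    · by_cases c2 : pvC2 ts = true
      · simp [pvChain, c0, c1, c2, pv_cond0, pv_cond1, pv_cond2, pvOptM, pvLabels]
      · by_cases c3 : pvC3 ts = true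
        · simp [pvChain, c0, c1, c2, c3, pv_cond0, pv_cond1, pv_cond2, pv_cond3, pvOptM, pvLabels]
        · simp [pvChain, c0, c1, c2, c3, pv_cond0, pv_cond1, pv_cond2, pv_cond3, pvOptM]
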